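-- pv_equiv track=rewrite | github.com/Frau-Ke/AcceleratedPathPatching | utils/circuit_functions.py | get_intersection_num
-- ===== SOURCE A (Python) =====
-- def get_intersection_num(circuit1:dict, circuit2:dict) -> int:
--     """Count the number of intersecting nodes
--
--     Args:
--         circuit1 (dict): circuit1
--         circuit2 (dict): circuit2
--
--     Returns:
--         int: number of intersections
--     """
--     all_layers = set(circuit1.keys()) | set(circuit2.keys())
--
--     total_intersection = 0
--
--     for layer in all_layers:
--         # Get the set of heads for the current layer in each dictionary (default to empty set if layer is absent)
--         heads1 = set(circuit1.get(layer, []))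
--         heads2 = set(circuit2.get(layer, []))
--
--         # Compute intersection and union for this layer
--         intersection = heads1 & heads2
--         total_intersection += len(intersection)
--     return total_intersection
-- ===== SOURCE B (Python) =====
-- def get_intersection_num(circuit1: dict, circuit2: dict) -> int:
--     """Count the number of intersecting (layer, head) nodes."""
--     pairs1 = {(layer, h) for layer, heads in circuit1.items() for h in heads}
--     pairs2 = {(layer, h) for layer, heads in circuit2.items() for h in heads}
--     return len(pairs1 & pairs2)
-- ===== Notes on version B (the rewrite author's own statement) =====
-- stated objective: simpler
-- what changed: Instead of iterating over the union of layer keys and summing per-layer set-intersection sizes, B flattens each circuit once into a set of (layer, head) pairs and returns the size of one set intersection.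
import Mathlib
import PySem

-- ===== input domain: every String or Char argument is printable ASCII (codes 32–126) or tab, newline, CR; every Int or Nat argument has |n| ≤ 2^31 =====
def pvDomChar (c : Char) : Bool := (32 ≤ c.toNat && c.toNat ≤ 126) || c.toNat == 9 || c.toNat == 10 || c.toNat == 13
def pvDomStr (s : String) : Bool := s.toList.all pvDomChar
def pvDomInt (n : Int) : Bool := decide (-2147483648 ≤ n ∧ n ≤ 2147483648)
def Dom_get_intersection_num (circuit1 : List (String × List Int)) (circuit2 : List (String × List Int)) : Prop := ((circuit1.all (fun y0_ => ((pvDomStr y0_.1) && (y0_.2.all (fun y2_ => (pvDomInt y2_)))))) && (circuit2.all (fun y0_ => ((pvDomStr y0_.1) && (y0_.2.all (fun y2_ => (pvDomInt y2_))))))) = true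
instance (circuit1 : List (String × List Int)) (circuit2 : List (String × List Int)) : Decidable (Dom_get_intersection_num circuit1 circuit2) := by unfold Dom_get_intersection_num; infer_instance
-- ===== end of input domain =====

-- B flattens each circuit once into a set of (layer, head) pairs and takes one set
-- intersection, instead of A's loop over the union of layer keys with a per-layer
-- intersection; objective: simpler. Equivalence is proved on assoc lists with
-- distinct layer keys (the lists that represent Python dicts).

-- ===== PORT A =====
def get_intersection_num (circuit1 : List (String × List Int)) (circuit2 : List (String × List Int)) : Int :=
  let d1 := PySem.Dict.mk circuit1
  let d2 := PySem.Dict.mk circuit2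
  -- all_layers = set(circuit1.keys()) | set(circuit2.keys()); the per-layer summation
  -- below is order-independent, so iterating the Set's list order is exact
  let all_layers : PySem.Set String :=
    PySem.Set.union (PySem.Set.ofList d1.keys) (PySem.Set.ofList d2.keys)
  all_layers.foldl (fun total_intersection layer =>
    let heads1 : PySem.Set Int := PySem.Set.ofList (d1.getD layer [])
    let heads2 : PySem.Set Int := PySem.Set.ofList (d2.getD layer [])
    total_intersection + PySem.Set.len (PySem.Set.inter heads1 heads2)) 0

-- ===== PORT B =====
-- {(layer, h) for layer, heads in circuit.items() for h in heads}
def pvFlatPairs (circuit : List (String × List Int)) : PySem.Set (String × Int) :=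
  PySem.Set.ofList (circuit.flatMap (fun p => p.2.map (fun h => (p.1, h))))

def get_intersection_num_alt (circuit1 : List (String × List Int)) (circuit2 : List (String × List Int)) : Int :=
  PySem.Set.len (PySem.Set.inter (pvFlatPairs circuit1) (pvFlatPairs circuit2))

-- ===== PRECONDITION & SPEC =====
-- Pre_ excludes association lists with duplicate layer keys: those do not represent a
-- Python dict (A's parameter type), since dict construction already merges duplicates.
def Pre_get_intersection_num (circuit1 : List (String × List Int)) (circuit2 : List (String × List Int)) : Prop :=
  (circuit1.map Prod.fst).Nodup ∧ (circuit2.map Prod.fst).Nodup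
instance (circuit1 : List (String × List Int)) (circuit2 : List (String × List Int)) : Decidable (Pre_get_intersection_num circuit1 circuit2) := by unfold Pre_get_intersection_num; infer_instance

def pvWitness_get_intersection_num : (List (String × List Int)) × (List (String × List Int)) :=
  ([("0", [1, 2]), ("1", [3])], [("0", [2, 5]), ("2", [3])])

def Spec_get_intersection_num (circuit1 : List (String × List Int)) (circuit2 : List (String × List Int)) (out : Int) : Prop := out = get_intersection_num_alt circuit1 circuit2
instance (circuit1 : List (String × List Int)) (circuit2 : List (String × List Int)) (out : Int) : Decidable (Spec_get_intersection_num circuit1 circuit2 out) := by unfold Spec_get_intersection_num; infer_instance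

-- ===== CLAIM (what is proved, stated in full; the proofs are below) =====
def Claim_equal_get_intersection_num : Prop := ∀ (circuit1 : List (String × List Int)) (circuit2 : List (String × List Int)), Dom_get_intersection_num circuit1 circuit2 → Pre_get_intersection_num circuit1 circuit2 → Spec_get_intersection_num circuit1 circuit2 (get_intersection_num circuit1 circuit2)

-- ===== LEMMAS AND PROOFS =====

-- membership in B's flattened pair list = membership in the heads A looks up for that layer
lemma mem_flat_iff (c : List (String × List Int)) (hn : (c.map Prod.fst).Nodup)
    (l : String) (h : Int) :
    (l, h) ∈ c.flatMap (fun p => p.2.map (fun x => (p.1, x))) ↔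
      h ∈ (PySem.Dict.mk c).getD l [] := by
  have hkeys : (PySem.Dict.mk c).keys.Nodup := by
    rw [PySem.Dict.keys_mk]; exact hn
  constructor
  · intro hm
    rcases List.mem_flatMap.1 hm with ⟨p, hp, hx⟩
    rcases List.mem_map.1 hx with ⟨x, hx2, hxe⟩
    obtain ⟨rfl, rfl⟩ : p.1 = l ∧ x = h := by
      constructor <;> [exact congrArg Prod.fst hxe; exact congrArg Prod.snd hxe]
    have hitems : (p.1, p.2) ∈ (PySem.Dict.mk c).items := hp
    rw [PySem.Dict.getD_of_mem_items _ hitems hkeys]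
    exact hx2
  · intro hm
    cases hq : (PySem.Dict.mk c).get? l with
    | none =>
        rw [PySem.Dict.getD_of_get?_eq_none _ _ hq] at hm
        exact absurd hm (List.not_mem_nil)
    | some v =>
        have hit : (l, v) ∈ (PySem.Dict.mk c).items :=
          PySem.Dict.mem_items_of_get?_eq_some _ hq
        rw [PySem.Dict.getD_of_get?_eq_some _ _ hq] at hm
        exact List.mem_flatMap.2 ⟨(l, v), hit, List.mem_map.2 ⟨h, hm, rfl⟩⟩

lemma main_perm (c1 c2 : List (String × List Int))
    (h1 : (c1.map Prod.fst).Nodup) (h2 : (c2.map Prod.fst).Nodup) :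
    ((PySem.Set.inter (pvFlatPairs c1) (pvFlatPairs c2)) : List (String × Int)).Perm
      ((PySem.Set.union (PySem.Set.ofList (PySem.Dict.mk c1).keys)
          (PySem.Set.ofList (PySem.Dict.mk c2).keys)).flatMap
        (fun l => (PySem.Set.inter
            (PySem.Set.ofList ((PySem.Dict.mk c1).getD l []))
            (PySem.Set.ofList ((PySem.Dict.mk c2).getD l []))).map (fun h => (l, h)))) := by
  have hk1 : (PySem.Dict.mk c1).keys.Nodup := by rw [PySem.Dict.keys_mk]; exact h1
  have hk2 : (PySem.Dict.mk c2).keys.Nodup := by rw [PySem.Dict.keys_mk]; exact h2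
  have hLnd : ((PySem.Set.union (PySem.Set.ofList (PySem.Dict.mk c1).keys)
      (PySem.Set.ofList (PySem.Dict.mk c2).keys)) : List String).Nodup :=
    PySem.Set.nodup_union _ _ (PySem.Set.nodup_ofList _)
  rw [List.perm_ext_iff_of_nodup]
  · rintro ⟨a, b⟩
    rw [PySem.Set.mem_inter, List.mem_flatMap]
    unfold pvFlatPairs
    rw [PySem.Set.mem_ofList, PySem.Set.mem_ofList, mem_flat_iff c1 h1, mem_flat_iff c2 h2]
    constructor
    · rintro ⟨hb1, hb2⟩
      refine ⟨a, ?_, List.mem_map.2 ⟨b, PySem.Set.mem_inter _ _ _ |>.2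
        ⟨PySem.Set.mem_ofList _ _ |>.2 hb1, PySem.Set.mem_ofList _ _ |>.2 hb2⟩, rfl⟩⟩
      apply (PySem.Set.mem_union _ _ _).2
      left
      rw [PySem.Set.mem_ofList]
      cases hq : (PySem.Dict.mk c1).get? a with
      | none =>
          rw [PySem.Dict.getD_of_get?_eq_none _ _ hq] at hb1
          exact absurd hb1 (List.not_mem_nil)
      | some v =>
          exact PySem.Dict.mem_keys_of_mem_items _ (PySem.Dict.mem_items_of_get?_eq_some _ hq)
    · rintro ⟨l, _, hx⟩
      rcases List.mem_map.1 hx with ⟨x, hx2, hxe⟩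
      obtain ⟨rfl, rfl⟩ : l = a ∧ x = b := by
        constructor <;> [exact congrArg Prod.fst hxe; exact congrArg Prod.snd hxe]
      rw [PySem.Set.mem_inter, PySem.Set.mem_ofList, PySem.Set.mem_ofList] at hx2
      exact hx2
  · exact PySem.Set.nodup_inter _ _ (PySem.Set.nodup_ofList _)
  · rw [List.nodup_flatMap]
    constructor
    · intro l _
      exact (PySem.Set.nodup_inter _ _ (PySem.Set.nodup_ofList _)).map
        (fun x y hxy => congrArg Prod.snd hxy)
    · refine hLnd.imp ?_
      intro l l' hne p hp hp'
      rcases List.mem_map.1 hp with ⟨x, _, hxe⟩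
      rcases List.mem_map.1 hp' with ⟨y, _, hye⟩
      exact hne (congrArg Prod.fst (hxe.trans hye.symm))

-- ===== VERDICT (by name: the statement is the Claim_ definition above) =====
theorem get_intersection_num_spec : Claim_equal_get_intersection_num := by
  intro c1 c2 _hdom ⟨h1, h2⟩
  unfold Spec_get_intersection_num get_intersection_num get_intersection_num_alt
  simp only []
  rw [PySem.List.foldl_add]
  have hp := main_perm c1 c2 h1 h2
  have hlen := hp.length_eq
  simp only [List.length_flatMap, List.length_map] at hlen
  simp only [PySem.Set.len, hlen]
  push_cast
  rw [List.map_map]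
  simp [Function.comp_def]
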